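-- pv_equiv track=rewrite | github.com/OnellaNatalie/smart-uml | backend/services/class_diagram_generation_service.py | generate_class_string_array
-- ===== SOURCE A (Python) =====
-- def remove_duplicate_class_names(data):
--     return list(dict.fromkeys(data))
--
-- def generate_class_string_array(actors, data):
--     class_content = []
--     for actor in actors:
--         single_class = []
--         for d in data:
--             if d[0] == actor:
--                 class_name_string = "class " + actor + ": \n\t\n"
--                 class_methods_string = "\t def " + d[1] + "(self): \n\t\t pass \n\n"
--                 single_class.extend((class_name_string, class_methods_string))
--         cleaned_class = remove_duplicate_class_names(single_class)
--         class_content.append(cleaned_class)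
--     return class_content
-- ===== SOURCE B (Python) =====
-- def generate_class_string_array(actors, data):
--     # Group data by class name in ONE pass: class -> deduped method list (first-occurrence order).
--     methods_by_actor = {}
--     for cls, meth in data:
--         ms = methods_by_actor.get(cls, [])
--         if meth not in ms:
--             methods_by_actor[cls] = ms + [meth]
--     out = []
--     for actor in actors:
--         ms = methods_by_actor.get(actor, [])
--         if not ms:
--             out.append([])
--         else:
--             out.append(["class " + actor + ": \n\t\n"]
--                        + ["\t def " + m + "(self): \n\t\t pass \n\n" for m in ms])
--     return out
-- ===== Notes on version B (the rewrite author's own statement) =====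
-- stated objective: faster
-- what changed: B pre-groups data by class name into a dict of deduplicated method lists in one pass and then builds each actor's block by a single dict lookup, instead of A's full scan of data per actor followed by a dedup of the interleaved header/method list.
import Mathlib
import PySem

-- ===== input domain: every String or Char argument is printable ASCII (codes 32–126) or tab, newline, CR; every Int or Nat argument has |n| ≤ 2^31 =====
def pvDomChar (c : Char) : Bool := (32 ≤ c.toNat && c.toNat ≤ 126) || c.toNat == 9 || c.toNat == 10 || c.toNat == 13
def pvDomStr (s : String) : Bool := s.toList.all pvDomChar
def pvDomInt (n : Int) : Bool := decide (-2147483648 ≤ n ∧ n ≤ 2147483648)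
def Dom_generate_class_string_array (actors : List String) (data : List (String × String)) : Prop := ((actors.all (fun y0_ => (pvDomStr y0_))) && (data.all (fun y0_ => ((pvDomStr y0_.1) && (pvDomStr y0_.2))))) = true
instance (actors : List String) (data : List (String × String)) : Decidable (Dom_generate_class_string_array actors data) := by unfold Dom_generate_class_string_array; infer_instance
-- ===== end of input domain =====

-- B pre-groups data by class name into a dict of deduplicated method lists in one pass
-- (O(actors+data)) instead of A's per-actor scan of all data followed by a dedup (O(actors*data)).


-- ===== PORT A =====
def remove_duplicate_class_names (data : List String) : List String :=
  PySem.List.dedup data   -- list(dict.fromkeys(data))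

def generate_class_string_array (actors : List String) (data : List (String × String)) : List (List String) :=
  actors.foldl (fun class_content actor =>
    let single_class := data.foldl (fun single_class d =>
      if d.1 == actor then
        single_class ++ ["class " ++ actor ++ ": \n\t\n",
                         "\t def " ++ d.2 ++ "(self): \n\t\t pass \n\n"]
      else single_class) []
    let cleaned_class := remove_duplicate_class_names single_class
    class_content ++ [cleaned_class]) []

-- ===== PORT B =====
def generate_class_string_array_alt (actors : List String) (data : List (String × String)) : List (List String) :=
  let methods_by_actor : PySem.Dict String (List String) :=
    data.foldl (fun g d =>
      let ms := g.getD d.1 []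
      if d.2 ∈ ms then g else g.insert d.1 (ms ++ [d.2])) PySem.Dict.empty
  actors.map (fun actor =>
    let ms := methods_by_actor.getD actor []
    if ms.isEmpty then []
    else ("class " ++ actor ++ ": \n\t\n")
         :: ms.map (fun m => "\t def " ++ m ++ "(self): \n\t\t pass \n\n"))

-- ===== PRECONDITION & SPEC =====
def Spec_generate_class_string_array (actors : List String) (data : List (String × String)) (out : List (List String)) : Prop := out = generate_class_string_array_alt actors data
instance (actors : List String) (data : List (String × String)) (out : List (List String)) : Decidable (Spec_generate_class_string_array actors data out) := by unfold Spec_generate_class_string_array; infer_instance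

-- ===== CLAIM (what is proved, stated in full; the proofs are below) =====
def Claim_equal_generate_class_string_array : Prop := ∀ (actors : List String) (data : List (String × String)), Dom_generate_class_string_array actors data → Spec_generate_class_string_array actors data (generate_class_string_array actors data)

-- ===== LEMMAS AND PROOFS =====

-- the methods listed under `actor`, in data order
def pvMs (actor : String) (data : List (String × String)) : List String :=
  (data.filter (fun d => d.1 == actor)).map Prod.snd

def pvHdr (actor : String) : String := "class " ++ actor ++ ": \n\t\n"
def pvMeth (m : String) : String := "\t def " ++ m ++ "(self): \n\t\t pass \n\n"

lemma pv_hdr_ne_meth (a m : String) : pvHdr a ≠ pvMeth m := by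
  intro h
  have h2 : (pvHdr a).toList = (pvMeth m).toList := by rw [h]
  simp [pvHdr, pvMeth] at h2

lemma pv_meth_inj {m m' : String} (h : pvMeth m = pvMeth m') : m = m' := by
  have h2 : (pvMeth m).toList = (pvMeth m').toList := by rw [h]
  simp [pvMeth] at h2
  exact String.ext h2

-- A's inner loop collects, for the matching pairs, the header/method strings in order
lemma pv_inner (actor : String) (data : List (String × String)) (init : List String) :
    data.foldl (fun single_class d =>
      if d.1 == actor then single_class ++ [pvHdr actor, pvMeth d.2] else single_class) init
    = init ++ (pvMs actor data).flatMap (fun m => [pvHdr actor, pvMeth m]) := by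
  induction data generalizing init with
  | nil => simp [pvMs]
  | cons d rest ih =>
    rw [List.foldl_cons, ih]
    by_cases hd : d.1 == actor
    · rw [if_pos hd]
      simp [pvMs, hd]
    · rw [if_neg hd]
      simp [pvMs, hd]

lemma pv_flat_add (a : String) : ∀ (ms acc : List String), pvHdr a ∈ acc →
    List.foldl PySem.Set.add acc (ms.flatMap fun m => [pvHdr a, pvMeth m])
    = List.foldl PySem.Set.add acc (ms.map pvMeth) := by
  intro ms
  induction ms with
  | nil => intro acc _; rfl
  | cons m rest ih =>
    intro acc hacc
    simp only [List.flatMap_cons, List.map_cons, List.foldl_append, List.foldl_cons]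
    rw [PySem.Set.add_of_mem hacc]
    exact ih _ (by by_cases h : pvMeth m ∈ acc <;>
      simp [h, hacc])

lemma pv_fold_meth (a : String) : ∀ (ms s : List String),
    List.foldl PySem.Set.add (pvHdr a :: s.map pvMeth) (ms.map pvMeth)
    = pvHdr a :: (List.foldl PySem.Set.add s ms).map pvMeth := by
  intro ms
  induction ms with
  | nil => intro s; rfl
  | cons m rest ih =>
    intro s
    have hmem : pvMeth m ∈ pvHdr a :: s.map pvMeth ↔ m ∈ s := by
      simp only [List.mem_cons, List.mem_map]
      constructor
      · rintro (h | ⟨x, hx, hxm⟩)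
        · exact absurd h.symm (pv_hdr_ne_meth a m)
        · exact (pv_meth_inj hxm) ▸ hx
      · intro h; exact Or.inr ⟨m, h, rfl⟩
    simp only [List.map_cons, List.foldl_cons]
    by_cases h : m ∈ s
    · rw [PySem.Set.add_of_mem (hmem.mpr h), PySem.Set.add_of_mem h, ih]
    · rw [PySem.Set.add_of_not_mem (fun hc => h (hmem.mp hc)),
          PySem.Set.add_of_not_mem h]
      have : (pvHdr a :: s.map pvMeth) ++ [pvMeth m] = pvHdr a :: (s ++ [m]).map pvMeth := by
        simp
      rw [this, ih]

-- dedup of the interleaved header/method list = header once, then the deduped methods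
lemma pv_dedup_flat (a : String) (ms : List String) :
    PySem.List.dedup (ms.flatMap fun m => [pvHdr a, pvMeth m])
    = match ms with
      | [] => []
      | _ :: _ => pvHdr a :: (PySem.List.dedup ms).map pvMeth := by
  cases ms with
  | nil => rfl
  | cons m rest =>
    simp only [PySem.List.dedup_eq_ofList, PySem.Set.ofList_eq_foldl]
    simp only [List.flatMap_cons, List.foldl_append, List.foldl_cons, List.foldl_nil]
    have h1 : PySem.Set.add ([] : List String) (pvHdr a) = [pvHdr a] :=
      PySem.Set.add_of_not_mem (List.not_mem_nil)
    have h2 : PySem.Set.add [pvHdr a] (pvMeth m) = [pvHdr a, pvMeth m] :=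
      PySem.Set.add_of_not_mem (by simp [(pv_hdr_ne_meth a m).symm])
    rw [h1, h2]
    have h3 : ([pvHdr a, pvMeth m] : List String) = pvHdr a :: ([m].map pvMeth) := by simp
    rw [h3, pv_flat_add a rest _ (by exact List.mem_cons_self), pv_fold_meth a rest [m]]
    have h4 : ([m] : List String) = PySem.Set.add [] m :=
      (PySem.Set.add_of_not_mem (List.not_mem_nil)).symm
    rw [h4]

-- the grouping dict of B, read at any key, is the fold of Set.add over that key's methods
lemma pv_groups (data : List (String × String)) :
    ∀ (g : PySem.Dict String (List String)) (a : String),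
    (data.foldl (fun g d =>
      let ms := g.getD d.1 []
      if d.2 ∈ ms then g else g.insert d.1 (ms ++ [d.2])) g).getD a []
    = List.foldl PySem.Set.add (g.getD a []) (pvMs a data) := by
  induction data with
  | nil => intro g a; rfl
  | cons d rest ih =>
    intro g a
    simp only [List.foldl_cons]
    by_cases hd : d.1 = a
    · subst hd
      simp only [pvMs, List.filter_cons, beq_self_eq_true, if_pos, List.map_cons,
        List.foldl_cons]
      by_cases h : d.2 ∈ g.getD d.1 []
      · rw [ih, PySem.Set.add_of_mem h]
        simp [h, pvMs]
      · simp only [h, ite_false]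
        rw [ih, PySem.Dict.getD_insert_self, PySem.Set.add_of_not_mem h]
        simp [pvMs]
    · have hms : pvMs a (d :: rest) = pvMs a rest := by
        simp [pvMs, beq_iff_eq, hd]
      rw [hms]
      by_cases h : d.2 ∈ g.getD d.1 []
      · simp only [h, ite_true]; exact ih g a
      · simp only [h, ite_false]
        rw [ih, PySem.Dict.getD_insert_of_ne _ _ _ (fun hc => hd hc.symm)]

lemma pv_dedup_ne_nil (m : String) (rest : List String) :
    (PySem.List.dedup (m :: rest)).isEmpty = false := by
  have : m ∈ PySem.List.dedup (m :: rest) := by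
    rw [PySem.List.mem_dedup]; exact List.mem_cons_self
  cases hc : PySem.List.dedup (m :: rest) with
  | nil => rw [hc] at this; cases this
  | cons _ _ => rfl

-- the two per-actor blocks agree
lemma pv_per_actor (a : String) (data : List (String × String)) :
    remove_duplicate_class_names
      (data.foldl (fun single_class d =>
        if d.1 == a then
          single_class ++ ["class " ++ a ++ ": \n\t\n",
                           "\t def " ++ d.2 ++ "(self): \n\t\t pass \n\n"]
        else single_class) [])
    = (let ms := (data.foldl (fun g d =>
          let ms := g.getD d.1 []
          if d.2 ∈ ms then g else g.insert d.1 (ms ++ [d.2])) PySem.Dict.empty).getD a []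
       if ms.isEmpty then []
       else ("class " ++ a ++ ": \n\t\n")
            :: ms.map (fun m => "\t def " ++ m ++ "(self): \n\t\t pass \n\n")) := by
  have hB : (data.foldl (fun g d =>
          let ms := g.getD d.1 []
          if d.2 ∈ ms then g else g.insert d.1 (ms ++ [d.2])) PySem.Dict.empty).getD a []
      = PySem.List.dedup (pvMs a data) := by
    rw [pv_groups data PySem.Dict.empty a, PySem.List.dedup_eq_ofList,
        PySem.Set.ofList_eq_foldl]
    rfl
  have hA : (data.foldl (fun single_class d =>
        if d.1 == a then
          single_class ++ ["class " ++ a ++ ": \n\t\n",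
                           "\t def " ++ d.2 ++ "(self): \n\t\t pass \n\n"]
        else single_class) [])
      = (pvMs a data).flatMap (fun m => [pvHdr a, pvMeth m]) := by
    have := pv_inner a data []
    simpa [pvHdr, pvMeth] using this
  rw [hA, hB]
  show remove_duplicate_class_names _ = _
  rw [remove_duplicate_class_names, pv_dedup_flat a (pvMs a data)]
  cases hms : pvMs a data with
  | nil => rfl
  | cons m rest =>
    simp only [pv_dedup_ne_nil m rest, Bool.false_eq_true, if_false]
    simp [pvHdr, pvMeth]

-- ===== VERDICT (by name: the statement is the Claim_ definition above) =====
theorem generate_class_string_array_spec : Claim_equal_generate_class_string_array := by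
  intro actors data _
  show generate_class_string_array actors data = generate_class_string_array_alt actors data
  simp only [generate_class_string_array, generate_class_string_array_alt]
  rw [PySem.List.foldl_append_singleton_eq_map]
  simp only [List.nil_append]
  exact List.map_congr_left (fun a _ => pv_per_actor a data)
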